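-- pv_equiv track=rewrite | github.com/SunFei123456/admetchem | backend/admet-prediction/train/model1/predict.py | categorize_tasks
-- ===== SOURCE A (Python) =====
-- dic = {
--         "LogS": "reg",
--         "LogP": "reg",
--         "LogD": "reg",
--         "Caco-2": "reg",
--         "CL": "reg",
--         "Drug Half-Life": "reg",
--         "ROA": "reg",
--         "PPBR": "reg",
--         "VDss": "reg",
--         "Hydration Free Energy" : "hfe",
--         "CYP1A2-inh": "class",
--         "CYP2C9-inh": "class",
--         "CYP2C9-sub": "class",
--         "CYP2C19-inh": "class",
--         "CYP2D6-inh": "class",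
--         "CYP2D6-sub": "class",
--         "CYP3A4-inh": "class",
--         "CYP3A4-sub": "class",
--         "hERG": "class",
--         "Pgp-inh": "class",
--         "Ames": "class",
--         "BBB": "class",
--         "DILI": "class",
--         "HIA": "class",
--         "SkinSen": "class",
--         "NR-AR-LBD": "class",
--         "NR-AR": "class",
--         "NR-AhR": "class",
--         "NR-Aromatase": "class",
--         "NR-ER": "class",
--         "NR-ER-LBD": "class",
--         "NR-PPAR-gamma": "class",
--         "SR-ARE": "class",
--         "SR-ATAD5": "class",
--         "SR-HSE": "class",
--         "SR-MMP": "class",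
--         "SR-p53": "class",
--         "PAMPA":"pama",
--         "Bioavailability":"bio"
-- }
--
-- def categorize_tasks(task_types):
--     # 创建分类字典
--     categorized = {
--         "reg": [],
--         "class": [],
--         "hfe": [],
--         "pama": [],
--         "bio": []
--     }
--
--     # 对每个任务类型进行分类
--     for task in task_types:
--         if task in dic:
--             category = dic[task]
--             categorized[category].append(task)
--
--     # 移除空类别
--     categorized = {k: v for k, v in categorized.items() if v}
--     return categorized
-- ===== SOURCE B (Python) =====
-- # B inverts the table: a fixed list of (category, member-names) groups in
-- # canonical order; each bucket is a membership-filter re-scan of task_types.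
-- CATEGORY_TASKS = [
--     ("reg", ["LogS", "LogP", "LogD", "Caco-2", "CL", "Drug Half-Life",
--              "ROA", "PPBR", "VDss"]),
--     ("class", ["CYP1A2-inh", "CYP2C9-inh", "CYP2C9-sub", "CYP2C19-inh",
--                "CYP2D6-inh", "CYP2D6-sub", "CYP3A4-inh", "CYP3A4-sub",
--                "hERG", "Pgp-inh", "Ames", "BBB", "DILI", "HIA", "SkinSen",
--                "NR-AR-LBD", "NR-AR", "NR-AhR", "NR-Aromatase", "NR-ER",
--                "NR-ER-LBD", "NR-PPAR-gamma", "SR-ARE", "SR-ATAD5",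
--                "SR-HSE", "SR-MMP", "SR-p53"]),
--     ("hfe", ["Hydration Free Energy"]),
--     ("pama", ["PAMPA"]),
--     ("bio", ["Bioavailability"]),
-- ]
--
-- def categorize_tasks(task_types):
--     result = {}
--     for cat, names in CATEGORY_TASKS:
--         bucket = [t for t in task_types if t in names]
--         if bucket:
--             result[cat] = bucket
--     return result
-- ===== Notes on version B (the rewrite author's own statement) =====
-- stated objective: alternative
-- what changed: B inverts the lookup table into fixed (category, member-names) groups in canonical order and builds each bucket by a membership-filter re-scan of the task list, instead of A's single-pass dict bucketing with pre-seeded buckets and empty-bucket removal.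
import Mathlib
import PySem

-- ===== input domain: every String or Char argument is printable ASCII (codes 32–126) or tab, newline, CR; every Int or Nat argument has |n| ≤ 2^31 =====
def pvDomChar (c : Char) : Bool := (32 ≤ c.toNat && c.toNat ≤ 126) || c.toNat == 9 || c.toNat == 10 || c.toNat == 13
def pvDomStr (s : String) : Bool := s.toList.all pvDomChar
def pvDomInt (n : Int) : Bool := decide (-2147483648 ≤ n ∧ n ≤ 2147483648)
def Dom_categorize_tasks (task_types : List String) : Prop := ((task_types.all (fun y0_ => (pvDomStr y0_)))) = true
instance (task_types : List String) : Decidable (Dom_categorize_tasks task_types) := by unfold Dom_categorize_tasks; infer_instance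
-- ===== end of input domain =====

-- B inverts the lookup table into fixed (category, member-names) groups and builds each
-- bucket by a membership-filter re-scan per category (objective: alternative).

-- ===== PORT A =====
-- the module-level table `dic` used by A
def dicItems : List (String × String) := [
  ("LogS", "reg"), ("LogP", "reg"), ("LogD", "reg"), ("Caco-2", "reg"), ("CL", "reg"),
  ("Drug Half-Life", "reg"), ("ROA", "reg"), ("PPBR", "reg"), ("VDss", "reg"),
  ("Hydration Free Energy", "hfe"),
  ("CYP1A2-inh", "class"), ("CYP2C9-inh", "class"), ("CYP2C9-sub", "class"), ("CYP2C19-inh", "class"),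
  ("CYP2D6-inh", "class"), ("CYP2D6-sub", "class"), ("CYP3A4-inh", "class"), ("CYP3A4-sub", "class"),
  ("hERG", "class"), ("Pgp-inh", "class"), ("Ames", "class"), ("BBB", "class"), ("DILI", "class"),
  ("HIA", "class"), ("SkinSen", "class"), ("NR-AR-LBD", "class"), ("NR-AR", "class"), ("NR-AhR", "class"),
  ("NR-Aromatase", "class"), ("NR-ER", "class"), ("NR-ER-LBD", "class"), ("NR-PPAR-gamma", "class"),
  ("SR-ARE", "class"), ("SR-ATAD5", "class"), ("SR-HSE", "class"), ("SR-MMP", "class"), ("SR-p53", "class"),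
  ("PAMPA", "pama"), ("Bioavailability", "bio")]

def dicTable : PySem.Dict String String := PySem.Dict.mk dicItems

-- 'if task in dic: category = dic[task]; categorized[category].append(task)'
def stepA (d : PySem.Dict String (List String)) (task : String) : PySem.Dict String (List String) :=
  match PySem.Dict.get? dicTable task with
  | some category => d.modify category [] (fun l => l ++ [task])
  | none => d

def categorize_tasks (task_types : List String) : List (String × List String) :=
  let categorized : PySem.Dict String (List String) :=
    PySem.Dict.mk [("reg", []), ("class", []), ("hfe", []), ("pama", []), ("bio", [])]
  let categorized := task_types.foldl stepA categorized
  -- {k: v for k, v in categorized.items() if v}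
  (PySem.Dict.mk (categorized.items.filter (fun kv => !kv.2.isEmpty))).items

-- ===== PORT B =====
-- CATEGORY_TASKS: fixed (category, member-names) groups in canonical order
def pvGroups : List (String × List String) := [
  ("reg", ["LogS", "LogP", "LogD", "Caco-2", "CL", "Drug Half-Life",
           "ROA", "PPBR", "VDss"]),
  ("class", ["CYP1A2-inh", "CYP2C9-inh", "CYP2C9-sub", "CYP2C19-inh",
             "CYP2D6-inh", "CYP2D6-sub", "CYP3A4-inh", "CYP3A4-sub",
             "hERG", "Pgp-inh", "Ames", "BBB", "DILI", "HIA", "SkinSen",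
             "NR-AR-LBD", "NR-AR", "NR-AhR", "NR-Aromatase", "NR-ER",
             "NR-ER-LBD", "NR-PPAR-gamma", "SR-ARE", "SR-ATAD5",
             "SR-HSE", "SR-MMP", "SR-p53"]),
  ("hfe", ["Hydration Free Energy"]),
  ("pama", ["PAMPA"]),
  ("bio", ["Bioavailability"])]

-- result is a dict with fresh distinct keys inserted in order, i.e. appending pairs
def categorize_tasks_alt (task_types : List String) : List (String × List String) :=
  pvGroups.foldl (fun result g =>
    let bucket := task_types.filter (fun t => g.2.contains t)
    if bucket.isEmpty then result else result ++ [(g.1, bucket)]) []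

-- ===== PRECONDITION & SPEC =====
def Spec_categorize_tasks (task_types : List String) (out : List (String × List String)) : Prop := out = categorize_tasks_alt task_types
instance (task_types : List String) (out : List (String × List String)) : Decidable (Spec_categorize_tasks task_types out) := by unfold Spec_categorize_tasks; infer_instance

-- ===== CLAIM =====
def Claim_equal_categorize_tasks : Prop := ∀ (task_types : List String), Dom_categorize_tasks task_types → Spec_categorize_tasks task_types (categorize_tasks task_types)

-- ===== LEMMAS AND PROOFS =====

def pvCategories : List String := ["reg", "class", "hfe", "pama", "bio"]

-- the bucket built from A's table for category c
def bucketOf (task_types : List String) (c : String) : List String :=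
  task_types.filter (fun t => PySem.Dict.get? dicTable t == some c)

lemma nodup_dicKeys : (dicItems.map Prod.fst).Nodup := by decide

-- a first-match lookup in a nodup-keyed association list hits value c iff the key is among
-- the keys paired with c
lemma get?_mk_eq_some_iff (l : List (String × String)) (t c : String)
    (hnd : (l.map Prod.fst).Nodup) :
    ((PySem.Dict.mk l).get? t = some c) ↔ t ∈ (l.filter (fun p => p.2 == c)).map Prod.fst := by
  induction l with
  | nil => simp [PySem.Dict.get?]
  | cons p rest ih =>
    obtain ⟨k, v⟩ := p
    simp only [List.map_cons, List.nodup_cons] at hnd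
    rw [PySem.Dict.get?_mk_cons]
    by_cases hkt : (k == t) = true
    · have hk : k = t := eq_of_beq hkt
      subst hk
      rw [if_pos hkt]
      by_cases hvc : (v == c) = true
      · rw [List.filter_cons_of_pos (by simpa using hvc), List.map_cons]
        simp [eq_of_beq hvc]
      · rw [List.filter_cons_of_neg (by simpa using hvc)]
        constructor
        · intro h
          exact absurd (Option.some.inj h) (by simpa using hvc)
        · intro hmem
          obtain ⟨q, hq, hfst⟩ := List.mem_map.mp hmem
          exact absurd (hfst ▸ List.mem_map_of_mem (List.mem_of_mem_filter hq)) hnd.1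
    · rw [if_neg hkt]
      have hne : t ≠ k := fun h => hkt (by simp [h])
      by_cases hvc : (v == c) = true
      · rw [List.filter_cons_of_pos (by simpa using hvc), List.map_cons, ih hnd.2, List.mem_cons]
        constructor
        · exact Or.inr
        · rintro (h | h)
          · exact absurd h hne
          · exact h
      · rw [List.filter_cons_of_neg (by simpa using hvc), ih hnd.2]

-- A's table maps t to category c exactly when c's member-name list contains t
lemma lookup_eq_contains (c : String) (names : List String)
    (e : (dicItems.filter (fun p => p.2 == c)).map Prod.fst = names) (t : String) :
    (PySem.Dict.get? dicTable t == some c) = names.contains t := by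
  have h := get?_mk_eq_some_iff dicItems t c nodup_dicKeys
  rw [e] at h
  rw [Bool.eq_iff_iff, beq_iff_eq]
  unfold dicTable
  rw [h]
  simp

-- A's bucket for category c is B's membership filter over c's member names
lemma bucketOf_eq_filter (ts : List String) (c : String) (names : List String)
    (e : (dicItems.filter (fun p => p.2 == c)).map Prod.fst = names) :
    bucketOf ts c = ts.filter (fun t => names.contains t) := by
  unfold bucketOf
  congr 1
  funext t
  exact lookup_eq_contains c names e t

-- A's loop keeps the key list of the state unchanged
lemma keys_stepA (d : PySem.Dict String (List String)) (t : String)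
    (h : d.keys = pvCategories) : (stepA d t).keys = pvCategories := by
  unfold stepA
  cases hg : PySem.Dict.get? dicTable t with
  | none => exact h
  | some v =>
    have hmem : (t, v) ∈ dicTable.items := PySem.Dict.mem_items_of_get?_eq_some _ hg
    have hv : v ∈ pvCategories := by
      simp [dicTable, dicItems, pvCategories] at hmem ⊢
      tauto
    have hc : d.contains v = true := by
      rw [PySem.Dict.contains_iff_mem_keys, h]; exact hv
    rw [PySem.Dict.keys_modify, PySem.Dict.keys_insert_of_contains _ _ hc, h]

lemma keys_loopA (ts : List String) (d : PySem.Dict String (List String))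
    (h : d.keys = pvCategories) : (ts.foldl stepA d).keys = pvCategories := by
  induction ts generalizing d with
  | nil => exact h
  | cons t ts ih => exact ih _ (keys_stepA d t h)

-- pointwise value of A's loop state: initial bucket ++ the table-filter bucket
lemma getD_loopA (ts : List String) (d : PySem.Dict String (List String)) (c : String) :
    (ts.foldl stepA d).getD c [] = d.getD c [] ++ bucketOf ts c := by
  induction ts generalizing d with
  | nil => simp [bucketOf]
  | cons t ts ih =>
    simp only [List.foldl_cons]
    rw [ih]
    unfold stepA bucketOf
    cases hg : PySem.Dict.get? dicTable t with
    | none => simp [hg]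
    | some v =>
      rw [PySem.Dict.getD_modify]
      by_cases hcv : c = v
      · subst hcv
        simp [hg]
      · have : ¬ (PySem.Dict.get? dicTable t == some c) = true := by
          simp [hg]; exact fun hvc => hcv hvc.symm
        simp [hcv, this]

-- ===== VERDICT =====
set_option maxHeartbeats 1000000 in
theorem categorize_tasks_spec : Claim_equal_categorize_tasks := by
  intro task_types _
  show categorize_tasks task_types = categorize_tasks_alt task_types
  unfold categorize_tasks
  have hk : (task_types.foldl stepA (PySem.Dict.mk
      [("reg", []), ("class", []), ("hfe", []), ("pama", []), ("bio", [])])).keys = pvCategories := by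
    apply keys_loopA
    simp [PySem.Dict.keys, pvCategories]
  have hnd : (task_types.foldl stepA (PySem.Dict.mk
      [("reg", []), ("class", []), ("hfe", []), ("pama", []), ("bio", [])])).keys.Nodup := by
    rw [hk]; decide
  have hitems := PySem.Dict.items_eq_map_keys _ hnd ([] : List String)
  rw [hk] at hitems
  show (PySem.Dict.mk ((List.foldl stepA (PySem.Dict.mk [("reg", []), ("class", []), ("hfe", []), ("pama", []), ("bio", [])]) task_types).items.filter (fun kv => !kv.2.isEmpty))).items = categorize_tasks_alt task_types
  rw [hitems]
  simp only [pvCategories, List.map_cons, List.map_nil]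
  rw [getD_loopA, getD_loopA, getD_loopA, getD_loopA, getD_loopA]
  have hinit : ∀ c : String, (PySem.Dict.mk
      [("reg", ([] : List String)), ("class", []), ("hfe", []), ("pama", []), ("bio", [])]).getD c [] = [] := by
    intro c
    rw [PySem.Dict.getD_eq_get?_getD]
    simp [PySem.Dict.get?_mk_cons]
    split_ifs <;> simp [PySem.Dict.get?]
  rw [hinit, hinit, hinit, hinit, hinit]
  rw [bucketOf_eq_filter task_types "reg" ["LogS", "LogP", "LogD", "Caco-2", "CL", "Drug Half-Life", "ROA", "PPBR", "VDss"] rfl,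
      bucketOf_eq_filter task_types "class" ["CYP1A2-inh", "CYP2C9-inh", "CYP2C9-sub", "CYP2C19-inh", "CYP2D6-inh", "CYP2D6-sub", "CYP3A4-inh", "CYP3A4-sub", "hERG", "Pgp-inh", "Ames", "BBB", "DILI", "HIA", "SkinSen", "NR-AR-LBD", "NR-AR", "NR-AhR", "NR-Aromatase", "NR-ER", "NR-ER-LBD", "NR-PPAR-gamma", "SR-ARE", "SR-ATAD5", "SR-HSE", "SR-MMP", "SR-p53"] rfl,
      bucketOf_eq_filter task_types "hfe" ["Hydration Free Energy"] rfl,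
      bucketOf_eq_filter task_types "pama" ["PAMPA"] rfl,
      bucketOf_eq_filter task_types "bio" ["Bioavailability"] rfl]
  unfold categorize_tasks_alt pvGroups
  simp only [List.foldl_cons, List.foldl_nil, List.nil_append]
  generalize (List.filter (fun t => (["LogS", "LogP", "LogD", "Caco-2", "CL", "Drug Half-Life", "ROA", "PPBR", "VDss"] : List String).contains t) task_types) = b1
  generalize (List.filter (fun t => (["CYP1A2-inh", "CYP2C9-inh", "CYP2C9-sub", "CYP2C19-inh", "CYP2D6-inh", "CYP2D6-sub", "CYP3A4-inh", "CYP3A4-sub", "hERG", "Pgp-inh", "Ames", "BBB", "DILI", "HIA", "SkinSen", "NR-AR-LBD", "NR-AR", "NR-AhR", "NR-Aromatase", "NR-ER", "NR-ER-LBD", "NR-PPAR-gamma", "SR-ARE", "SR-ATAD5", "SR-HSE", "SR-MMP", "SR-p53"] : List String).contains t) task_types) = b2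
  generalize (List.filter (fun t => (["Hydration Free Energy"] : List String).contains t) task_types) = b3
  generalize (List.filter (fun t => (["PAMPA"] : List String).contains t) task_types) = b4
  generalize (List.filter (fun t => (["Bioavailability"] : List String).contains t) task_types) = b5
  cases b1 <;> cases b2 <;> cases b3 <;> cases b4 <;> cases b5 <;>
    simp [List.filter]
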